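-- pv_equiv track=rewrite | github.com/Satyam-2001/My-Codes | python project/graph/greaph_space.py | hcf
-- ===== SOURCE A (Python) =====
-- def hcf(point):
--     x_list=[x[0] for x in point]
--     m=min(x_list)
--
--     for i in range(m,0,-1):
--         flag=True
--         for x in x_list:
--             if(x % i != 0) :
--                 flag=False
--                 break
--         if flag:
--             return i
--
-- point=[[5,3],[5,4],[5,1],[7,7],[9,11],[10,13]]
-- ===== SOURCE B (Python) =====
-- def hcf(point):
--     g = 0
--     for p in point:
--         x = p[0]
--         while x:
--             g, x = x, g % x
--     return g
-- ===== Notes on version B (the rewrite author's own statement) =====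
-- stated objective: alternative
-- what changed: Replaced A's descending trial-division search (try every i from min(x) down to 1 against all x-coordinates) with a single-pass Euclidean-algorithm gcd fold over the x-coordinates.
-- outside the precondition, e.g. on hcf([[0, 1], [4, 2]]): A returns None, B returns 4; on hcf([]): A raises ValueError, B returns 0
import Mathlib
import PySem

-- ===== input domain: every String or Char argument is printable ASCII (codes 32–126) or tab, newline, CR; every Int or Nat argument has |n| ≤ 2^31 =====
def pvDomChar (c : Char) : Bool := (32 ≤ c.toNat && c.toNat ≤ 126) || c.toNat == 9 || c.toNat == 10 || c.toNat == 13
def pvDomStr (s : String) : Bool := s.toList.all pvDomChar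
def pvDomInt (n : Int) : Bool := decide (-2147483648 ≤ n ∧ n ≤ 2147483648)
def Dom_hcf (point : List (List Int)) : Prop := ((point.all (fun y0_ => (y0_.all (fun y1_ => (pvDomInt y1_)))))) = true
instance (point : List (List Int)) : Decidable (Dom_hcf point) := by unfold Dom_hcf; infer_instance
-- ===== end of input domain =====

-- B replaces A's descending trial-division search with a single Euclidean-algorithm
-- fold over the x-coordinates (objective: alternative).

-- ===== PORT A =====
-- the 'for i in range(m,0,-1)' loop with its inner flag/break scan; returns 0 where Python returns None
def hcfLoop (x_list : List Int) : List Int → Int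
  | [] => 0
  | i :: rest =>
      if x_list.all (fun x => PySem.Int.mod x i == 0) then i else hcfLoop x_list rest

def hcf (point : List (List Int)) : Int :=
  let x_list := point.map (fun x => (PySem.List.pyGet? x 0).getD 0)
  match PySem.List.min? x_list (fun y => y) with
  | none => 0
  | some m => hcfLoop x_list (PySem.List.pyRange m 0 (-1))

-- ===== PORT B =====
-- B's inner 'while x: g, x = x, g % x'
def euclid (g x : Int) : Int :=
  if h : x = 0 then g else euclid x (PySem.Int.mod g x)
termination_by x.natAbs
decreasing_by
  rcases lt_trichotomy x 0 with hx | hx | hx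
  · have := PySem.Int.mod_neg_bounds g hx; omega
  · exact absurd hx h
  · have h1 := PySem.Int.mod_nonneg g hx; have h2 := PySem.Int.mod_lt g hx; omega

def hcf_alt (point : List (List Int)) : Int :=
  point.foldl (fun g p => euclid g ((PySem.List.pyGet? p 0).getD 0)) 0

-- ===== PRECONDITION & SPEC =====
-- Pre_ excludes: point = [] (min() raises ValueError), a row [] (p[0] raises IndexError), and
-- inputs whose minimal x-coordinate is ≤ 0, on which A's range is empty and A returns None,
-- which is not a value of the declared int type.
def Pre_hcf (point : List (List Int)) : Prop :=
  point ≠ [] ∧ ∀ p ∈ point, p ≠ [] ∧ 1 ≤ p.headI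

instance (point : List (List Int)) : Decidable (Pre_hcf point) := by
  unfold Pre_hcf; infer_instance

def pvWitness_hcf : List (List Int) := [[5, 3], [10, 4], [15]]

def Spec_hcf (point : List (List Int)) (out : Int) : Prop := out = hcf_alt point
instance (point : List (List Int)) (out : Int) : Decidable (Spec_hcf point out) := by
  unfold Spec_hcf; infer_instance

-- ===== CLAIM =====
def Claim_equal_hcf : Prop :=
  ∀ (point : List (List Int)), Dom_hcf point → Pre_hcf point → Spec_hcf point (hcf point)

-- ===== LEMMAS AND PROOFS =====

-- gcd recurrence matching Python's mod for a positive divisor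
theorem gcd_rec_int (a b : Int) : Int.gcd b (a % b) = Int.gcd a b := by
  apply Nat.dvd_antisymm
  · apply Int.dvd_gcd
    · have h1 := Int.gcd_dvd_left b (a % b)
      have h2 := Int.gcd_dvd_right b (a % b)
      have h3 : a % b + b * (a / b) = a := Int.emod_add_ediv a b
      have : (↑(Int.gcd b (a % b)) : Int) ∣ a % b + b * (a / b) :=
        dvd_add h2 (h1.mul_right _)
      rwa [h3] at this
    · exact Int.gcd_dvd_left b (a % b)
  · apply Int.dvd_gcd
    · exact Int.gcd_dvd_right a b
    · have h1 := Int.gcd_dvd_left a b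
      have h2 := Int.gcd_dvd_right a b
      have h3 : a % b = a - b * (a / b) := by
        have := Int.emod_add_ediv a b; omega
      rw [h3]
      exact dvd_sub h1 (h2.mul_right _)

theorem euclid_eq_gcd_aux (n : Nat) : ∀ g x : Int, 0 ≤ g → 0 ≤ x → x.natAbs ≤ n →
    euclid g x = (Int.gcd g x : Int) := by
  induction n with
  | zero =>
      intro g x hg hx hn
      have hx0 : x = 0 := by omega
      subst hx0
      rw [euclid]
      simp [Int.gcd, Int.natAbs_of_nonneg hg]
  | succ n ih =>
      intro g x hg hx hn
      rcases eq_or_lt_of_le hx with hx0 | hxpos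
      · rw [← hx0, euclid]
        simp [Int.gcd, Int.natAbs_of_nonneg hg]
      · rw [euclid]
        have hne : x ≠ 0 := by omega
        simp only [hne, dite_false]
        have hm := PySem.Int.mod_eq_emod_of_pos (a := g) hxpos
        have hmn : 0 ≤ PySem.Int.mod g x := PySem.Int.mod_nonneg g hxpos
        have hml : PySem.Int.mod g x < x := PySem.Int.mod_lt g hxpos
        rw [ih x (PySem.Int.mod g x) (le_of_lt hxpos) hmn (by omega)]
        rw [hm, gcd_rec_int]

theorem euclid_eq_gcd (g x : Int) (hg : 0 ≤ g) (hx : 0 ≤ x) :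
    euclid g x = (Int.gcd g x : Int) :=
  euclid_eq_gcd_aux x.natAbs g x hg hx le_rfl

-- the gcd accumulated by a foldl of Int.gcd
theorem gfold_nonneg (xs : List Int) : ∀ a : Int, 0 ≤ a →
    0 ≤ xs.foldl (fun g x => (Int.gcd g x : Int)) a := by
  induction xs with
  | nil => intro a ha; simpa using ha
  | cons x xs ih =>
      intro a ha
      simp only [List.foldl_cons]
      exact ih _ (Int.natCast_nonneg _)

theorem fold_euclid_eq_gfold (xs : List Int) : ∀ a : Int, 0 ≤ a → (∀ x ∈ xs, 0 ≤ x) →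
    xs.foldl (fun g x => euclid g x) a = xs.foldl (fun g x => (Int.gcd g x : Int)) a := by
  induction xs with
  | nil => intro a _ _; rfl
  | cons x xs ih =>
      intro a ha hxs
      simp only [List.foldl_cons]
      rw [euclid_eq_gcd a x ha (hxs x (List.mem_cons_self))]
      exact ih _ (Int.natCast_nonneg _) (fun y hy => hxs y (List.mem_cons_of_mem _ hy))

theorem gfold_dvd (xs : List Int) : ∀ a : Int,
    (xs.foldl (fun g x => (Int.gcd g x : Int)) a ∣ a) ∧
    (∀ x ∈ xs, xs.foldl (fun g x => (Int.gcd g x : Int)) a ∣ x) := by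
  induction xs with
  | nil => intro a; exact ⟨dvd_refl a, by simp⟩
  | cons x xs ih =>
      intro a
      simp only [List.foldl_cons]
      obtain ⟨h1, h2⟩ := ih ((Int.gcd a x : Int))
      refine ⟨h1.trans (Int.gcd_dvd_left a x), ?_⟩
      intro y hy
      rcases List.mem_cons.mp hy with rfl | hy
      · exact h1.trans (Int.gcd_dvd_right a y)
      · exact h2 y hy

theorem dvd_gfold (xs : List Int) : ∀ a c : Int, c ∣ a → (∀ x ∈ xs, c ∣ x) →
    c ∣ xs.foldl (fun g x => (Int.gcd g x : Int)) a := by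
  induction xs with
  | nil => intro a c hc _; simpa using hc
  | cons x xs ih =>
      intro a c hc hxs
      simp only [List.foldl_cons]
      apply ih
      · rw [← Int.natAbs_dvd]
        have h1 : (↑c.natAbs : Int) ∣ a := Int.natAbs_dvd.mpr hc
        have h2 : (↑c.natAbs : Int) ∣ x := Int.natAbs_dvd.mpr (hxs x (List.mem_cons_self))
        exact_mod_cast Int.natCast_dvd_natCast.mpr (Int.dvd_gcd h1 h2)
      · exact fun y hy => hxs y (List.mem_cons_of_mem _ hy)

-- A's descending search returns d, the greatest common divisor, once started at any k ≥ d
theorem hcfLoop_eq (xs : List Int) (d : Int) (hd : 1 ≤ d)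
    (hdvd : ∀ x ∈ xs, d ∣ x)
    (hmax : ∀ i : Int, 0 < i → (∀ x ∈ xs, i ∣ x) → i ≤ d) :
    ∀ n : Nat, ∀ k : Int, d ≤ k → (k - d).toNat = n →
      hcfLoop xs (PySem.List.pyRange k 0 (-1)) = d := by
  intro n
  induction n with
  | zero =>
      intro k hk hkn
      have hkd : k = d := by omega
      subst hkd
      rw [PySem.List.pyRange_neg_one_cons (by omega : (0:Int) < k)]
      rw [hcfLoop]
      have hall : xs.all (fun x => PySem.Int.mod x k == 0) = true := by
        simp only [List.all_eq_true, beq_iff_eq]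
        intro x hx
        exact (PySem.Int.mod_eq_zero_iff_dvd x k).mpr (hdvd x hx)
      rw [hall]; simp
  | succ n ih =>
      intro k hk hkn
      have hkgt : d < k := by omega
      rw [PySem.List.pyRange_neg_one_cons (by omega : (0:Int) < k)]
      rw [hcfLoop]
      have hfail : xs.all (fun x => PySem.Int.mod x k == 0) = false := by
        by_contra h
        have : xs.all (fun x => PySem.Int.mod x k == 0) = true := by
          cases hb : xs.all (fun x => PySem.Int.mod x k == 0) <;> simp_all
        simp only [List.all_eq_true, beq_iff_eq] at this
        have : k ≤ d := hmax k (by omega) (fun x hx => (PySem.Int.mod_eq_zero_iff_dvd x k).mp (this x hx))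
        omega
      rw [hfail]
      simp only [Bool.false_eq_true, if_false]
      exact ih (k - 1) (by omega) (by omega)

-- ===== VERDICT =====
theorem hcf_spec : Claim_equal_hcf := by
  intro point _hdom hpre
  obtain ⟨hne, hrows⟩ := hpre
  unfold Spec_hcf
  set f : List Int → Int := fun x => (PySem.List.pyGet? x 0).getD 0 with hf
  set x_list : List Int := point.map f with hxl
  -- every element of x_list is a headI of a row, hence ≥ 1
  have hpos : ∀ x ∈ x_list, 1 ≤ x := by
    intro x hx
    rw [hxl] at hx
    obtain ⟨p, hp, rfl⟩ := List.mem_map.mp hx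
    obtain ⟨hpne, hph⟩ := hrows p hp
    cases p with
    | nil => exact absurd rfl hpne
    | cons y t => simpa [hf, PySem.List.pyGet?, PySem.List.pyIdx?] using hph
  have hxlne : x_list ≠ [] := by
    rw [hxl]; simpa using hne
  -- the min exists
  have hgoal : hcf point = (match PySem.List.min? x_list (fun y => y) with
      | none => 0
      | some mm => hcfLoop x_list (PySem.List.pyRange mm 0 (-1))) := rfl
  cases hmin : PySem.List.min? x_list (fun y => y) with
  | none =>
      exact absurd ((PySem.List.min?_eq_none_iff _ _).mp hmin) hxlne
  | some m =>
      have hmmem : m ∈ x_list := PySem.List.min?_mem hmin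
      have hmle : ∀ y ∈ x_list, m ≤ y := by
        intro y hy; exact PySem.List.min?_isMin hmin y hy
      have hm1 : 1 ≤ m := hpos m hmmem
      -- d = the gcd of x_list, as computed by the gcd fold
      set d : Int := x_list.foldl (fun g x => (Int.gcd g x : Int)) 0 with hdd
      obtain ⟨_, hddvd⟩ := gfold_dvd x_list 0
      have hdnn : 0 ≤ d := gfold_nonneg x_list 0 le_rfl
      have hd1 : 1 ≤ d := by
        rcases eq_or_lt_of_le hdnn with h0 | h1
        · exfalso
          obtain ⟨x0, hx0⟩ := List.exists_mem_of_ne_nil x_list hxlne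
          have := hddvd x0 hx0
          rw [← hdd, ← h0] at this
          have : x0 = 0 := zero_dvd_iff.mp this
          have := hpos x0 hx0; omega
        · omega
      have hdmax : ∀ i : Int, 0 < i → (∀ x ∈ x_list, i ∣ x) → i ≤ d := by
        intro i hi hidvd
        have : i ∣ d := dvd_gfold x_list 0 i (dvd_zero i) hidvd
        exact Int.le_of_dvd (by omega) this
      have hdm : d ≤ m := Int.le_of_dvd (by omega) (hddvd m hmmem)
      -- A's side
      rw [hgoal, hmin]
      show hcfLoop x_list (PySem.List.pyRange m 0 (-1)) = _
      rw [hcfLoop_eq x_list d hd1 (fun x hx => hddvd x hx) hdmax (m - d).toNat m hdm rfl]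
      -- B's side
      show _ = hcf_alt point
      unfold hcf_alt
      rw [← List.foldl_map (f := f) (g := fun g x => euclid g x) (l := point) (init := (0:Int))]
      rw [fold_euclid_eq_gfold x_list 0 le_rfl (fun x hx => by have := hpos x hx; omega)]
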